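-- pv_equiv track=rewrite | github.com/NguyenAnhKhoa02/EnglishNotePlus | EnglistNotePlus/Core/Core_Text.py | getListBracket
-- ===== SOURCE A (Python) =====
-- def getListBracket(text : str) -> list:
--     listBrackets = list()
--
--     coupleBracket = list()
--     openBrakcet = 0
--     for index in range(text.__len__()):
--         if text[index].__eq__("("):
--             if openBrakcet == 0:
--                 coupleBracket.append(index)
--                 openBrakcet += 1
--             else:
--                 openBrakcet += 1
--         if text[index].__eq__(")"):
--            if openBrakcet == 1:
--                coupleBracket.append(index)
--                listBrackets.append(coupleBracket)
--                openBrakcet = 0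
--                coupleBracket = list()
--            elif openBrakcet > 1:
--                openBrakcet -= 1
--
--     return listBrackets
-- ===== SOURCE B (Python) =====
-- def getListBracket(text: str) -> list:
--     # Staged passes: 1) compute the clamped nesting depth before each character;
--     # 2) select top-level opens (depth 0 before a '(') and top-level closes
--     # (depth 1 before a ')'); 3) zip them into pairs.
--     depths = []
--     d = 0
--     for ch in text:
--         depths.append(d)
--         if ch == "(":
--             d += 1
--         elif ch == ")" and d > 0:
--             d -= 1
--     opens = [i for i, (ch, d0) in enumerate(zip(text, depths)) if ch == "(" and d0 == 0]
--     closes = [i for i, (ch, d0) in enumerate(zip(text, depths)) if ch == ")" and d0 == 1]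
--     return [[o, c] for o, c in zip(opens, closes)]
-- ===== Notes on version B (the rewrite author's own statement) =====
-- stated objective: alternative
-- what changed: Replaced the single stateful scan that accumulates a pending pair buffer with staged passes: first compute the clamped nesting-depth profile of the string, then select the top-level opening positions and the top-level closing positions as two independent comprehensions over the zipped profile, and finally zip the two position lists into pairs.
import Mathlib
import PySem

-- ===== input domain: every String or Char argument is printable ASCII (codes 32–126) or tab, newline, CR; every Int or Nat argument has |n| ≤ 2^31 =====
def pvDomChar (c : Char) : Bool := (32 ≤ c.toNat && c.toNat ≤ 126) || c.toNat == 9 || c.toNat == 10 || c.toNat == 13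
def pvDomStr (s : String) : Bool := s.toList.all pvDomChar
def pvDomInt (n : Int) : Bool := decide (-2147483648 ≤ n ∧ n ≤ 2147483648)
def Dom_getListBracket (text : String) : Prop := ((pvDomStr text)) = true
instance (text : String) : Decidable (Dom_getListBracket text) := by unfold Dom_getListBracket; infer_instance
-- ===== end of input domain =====

-- B replaces A's single stateful scan (pending-pair buffer + depth counter) with staged passes:
-- compute the clamped depth profile, select the top-level opening and closing positions independently, zip them (alternative; same O(n) cost).

-- ===== PORT A =====
-- A's loop state: (listBrackets, coupleBracket, openBrakcet); one step per character, branches in A's order.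
def getListBracketStep (st : List (List Int) × List Int × Int) (ic : Int × Char) : List (List Int) × List Int × Int :=
  let lb := st.1; let cb := st.2.1; let op := st.2.2
  let st1 :=
    if ic.2 = '(' then
      if op = 0 then (lb, cb ++ [ic.1], op + 1) else (lb, cb, op + 1)
    else (lb, cb, op)
  if ic.2 = ')' then
    if st1.2.2 = 1 then (st1.1 ++ [st1.2.1 ++ [ic.1]], [], 0)
    else if st1.2.2 > 1 then (st1.1, st1.2.1, st1.2.2 - 1)
    else st1
  else st1

def getListBracket (text : String) : List (List Int) :=
  ((PySem.List.enumerate text.toList).foldl getListBracketStep ([], [], 0)).1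

-- ===== PORT B =====
-- Pass 1 of Source B: clamped nesting depth before each character.
def altDepths (d : Int) : List Char → List Int
  | [] => []
  | c :: cs => d :: altDepths (if c = '(' then d + 1 else if c = ')' ∧ d > 0 then d - 1 else d) cs

-- Passes 2-4 of Source B: select top-level opens / closes from the zipped depth profile, pair them up.
def getListBracket_alt (text : String) : List (List Int) :=
  (((PySem.List.enumerate (text.toList.zip (altDepths 0 text.toList))).filterMap
      (fun p => if p.2.1 = '(' ∧ p.2.2 = 0 then some p.1 else none)).zip
   ((PySem.List.enumerate (text.toList.zip (altDepths 0 text.toList))).filterMap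
      (fun p => if p.2.1 = ')' ∧ p.2.2 = 1 then some p.1 else none))).map (fun p => [p.1, p.2])

-- ===== PRECONDITION & SPEC =====
def Spec_getListBracket (text : String) (out : List (List Int)) : Prop := out = getListBracket_alt text
instance (text : String) (out : List (List Int)) : Decidable (Spec_getListBracket text out) := by unfold Spec_getListBracket; infer_instance

-- ===== CLAIM (what is proved, stated in full; the proofs are below) =====
def Claim_equal_getListBracket : Prop := ∀ (text : String), Dom_getListBracket text → Spec_getListBracket text (getListBracket text)

-- ===== LEMMAS AND PROOFS =====

-- the depth-transition function shared by B's passes (proof-only abbreviation of altDepths' step)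
def pvStep (d : Int) (c : Char) : Int :=
  if c = '(' then d + 1 else if c = ')' ∧ d > 0 then d - 1 else d

-- recursive characterisations of B's open/close position lists
def pvOpens (i d : Int) : List Char → List Int
  | [] => []
  | c :: cs => if c = '(' ∧ d = 0 then i :: pvOpens (i + 1) (pvStep d c) cs else pvOpens (i + 1) (pvStep d c) cs

def pvCloses (i d : Int) : List Char → List Int
  | [] => []
  | c :: cs => if c = ')' ∧ d = 1 then i :: pvCloses (i + 1) (pvStep d c) cs else pvCloses (i + 1) (pvStep d c) cs

theorem pvOpens_eq (cs : List Char) : ∀ (i d : Int),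
    (PySem.List.enumerate (cs.zip (altDepths d cs)) i).filterMap
      (fun p => if p.2.1 = '(' ∧ p.2.2 = 0 then some p.1 else none) = pvOpens i d cs := by
  induction cs with
  | nil => intro i d; simp [altDepths, pvOpens, PySem.List.enumerate_nil]
  | cons c cs ih =>
    intro i d
    by_cases h : c = '(' ∧ d = 0
    · obtain ⟨h1, h2⟩ := h; subst h1; subst h2
      simp [altDepths, pvOpens, pvStep, PySem.List.enumerate_cons, ih]
    · simp [altDepths, pvOpens, pvStep, PySem.List.enumerate_cons, h, ih]

theorem pvCloses_eq (cs : List Char) : ∀ (i d : Int),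
    (PySem.List.enumerate (cs.zip (altDepths d cs)) i).filterMap
      (fun p => if p.2.1 = ')' ∧ p.2.2 = 1 then some p.1 else none) = pvCloses i d cs := by
  induction cs with
  | nil => intro i d; simp [altDepths, pvCloses, PySem.List.enumerate_nil]
  | cons c cs ih =>
    intro i d
    by_cases h : c = ')' ∧ d = 1
    · obtain ⟨h1, h2⟩ := h; subst h1; subst h2
      simp [altDepths, pvCloses, pvStep, PySem.List.enumerate_cons, ih]
    · simp [altDepths, pvCloses, pvStep, PySem.List.enumerate_cons, h, ih]

-- the simulation: A's fold from a state whose pair buffer matches B's pending top-level open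
theorem pvMain (cs : List Char) : ∀ (i d : Int) (lb : List (List Int)) (cb : List Int),
    0 ≤ d → (d = 0 → cb = []) → (0 < d → ∃ j, cb = [j]) →
    ((PySem.List.enumerate cs i).foldl getListBracketStep (lb, cb, d)).1
      = lb ++ ((cb ++ pvOpens i d cs).zip (pvCloses i d cs)).map (fun p => [p.1, p.2]) := by
  induction cs with
  | nil => intro i d lb cb _ _ _; simp [pvOpens, pvCloses, PySem.List.enumerate_nil]
  | cons c cs ih =>
    intro i d lb cb hd h0 h1
    rw [PySem.List.enumerate_cons, List.foldl_cons]
    by_cases hop : c = '('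
    · subst hop
      by_cases hz : d = 0
      · subst hz
        have hcb := h0 rfl; subst hcb
        simp only [getListBracketStep, pvOpens, pvCloses, pvStep]
        simp
        simpa using ih (i + 1) 1 lb [i] (by omega) (by omega) (fun _ => ⟨i, rfl⟩)
      · obtain ⟨j, hcb⟩ := h1 (by omega); subst hcb
        simp only [getListBracketStep, pvOpens, pvCloses, pvStep]
        simp [hz]
        simpa using ih (i + 1) (d + 1) lb [j] (by omega) (by omega) (fun _ => ⟨j, rfl⟩)
    · by_cases hcl : c = ')'
      · subst hcl
        by_cases hz : d = 0
        · subst hz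
          have hcb := h0 rfl; subst hcb
          simp only [getListBracketStep, pvOpens, pvCloses, pvStep]
          simp
          simpa using ih (i + 1) 0 lb [] (by omega) (fun _ => rfl) (by omega)
        · by_cases ho : d = 1
          · subst ho
            obtain ⟨j, hcb⟩ := h1 (by omega); subst hcb
            simp only [getListBracketStep, pvOpens, pvCloses, pvStep]
            simp
            rw [ih (i + 1) 0 (lb ++ [[j, i]]) [] (by omega) (fun _ => rfl) (by omega)]
            simp
          · obtain ⟨j, hcb⟩ := h1 (by omega); subst hcb
            simp only [getListBracketStep, pvOpens, pvCloses, pvStep]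
            simp [ho, show d > 1 by omega, show d > 0 by omega]
            simpa using ih (i + 1) (d - 1) lb [j] (by omega) (by omega) (fun _ => ⟨j, rfl⟩)
      · simp only [getListBracketStep, pvOpens, pvCloses, pvStep]
        simp [hop, hcl]
        simpa using ih (i + 1) d lb cb hd h0 h1

-- ===== VERDICT (by name: the statement is the Claim_ definition above) =====
theorem getListBracket_spec : Claim_equal_getListBracket := by
  intro text _
  unfold Spec_getListBracket getListBracket getListBracket_alt
  rw [pvOpens_eq, pvCloses_eq]
  simpa using pvMain text.toList 0 0 [] [] le_rfl (fun _ => rfl) (fun h => absurd h (by omega))
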